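-- pv_equiv track=rewrite | github.com/AndreiZherder/algorithms-and-data-structures | yandex-algorithm-training/b-5-e.py | solution
-- ===== SOURCE A (Python) =====
-- from typing import List, Tuple
--
-- def solution(s: int, a: List[Tuple[int, int]],
--              b: List[Tuple[int, int]],
--              c: List[Tuple[int, int]]) -> Tuple[int, int, int]:
--     a.sort()
--     b.sort()
--     c.sort(key=lambda item: (item[0], -item[1]))
--     ans = (15000, 15000, 15000)
--     for num1, i in a:
--         pos = len(c) - 1
--         for num2, j in b:
--             while pos >= 0 and c[pos][0] > s - (num1 + num2):
--                 pos -= 1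
--             if pos >= 0 and c[pos][0] == s - (num1 + num2):
--                 ans = min(ans, (i, j, c[pos][1]))
--
--     return ans
-- ===== SOURCE B (Python) =====
-- from typing import List, Tuple
--
-- def solution(s: int, a: List[Tuple[int, int]],
--              b: List[Tuple[int, int]],
--              c: List[Tuple[int, int]]) -> Tuple[int, int, int]:
--     a.sort()
--     b.sort()
--     c.sort(key=lambda item: (item[0], -item[1]))
--     # after the sort, within each value group indices come in decreasing order,
--     # so plain overwrites leave the MINIMAL index for every value
--     d = {}
--     for val, idx in c:
--         d[val] = idx
--     ans = (15000, 15000, 15000)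
--     for num1, i in a:
--         for num2, j in b:
--             k = d.get(s - (num1 + num2))
--             if k is not None:
--                 ans = min(ans, (i, j, k))
--     return ans
-- ===== Notes on version B (the rewrite author's own statement) =====
-- stated objective: simpler
-- what changed: B replaces A's stateful monotone two-pointer scan of the sorted c (a pos pointer threaded through the inner loop plus a while loop) with a dict built once after the sort mapping each c value to its minimal original index, so each (num1,num2) pair becomes a single lookup; the three in-place sorts are kept so argument mutation is identical.
import Mathlib
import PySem

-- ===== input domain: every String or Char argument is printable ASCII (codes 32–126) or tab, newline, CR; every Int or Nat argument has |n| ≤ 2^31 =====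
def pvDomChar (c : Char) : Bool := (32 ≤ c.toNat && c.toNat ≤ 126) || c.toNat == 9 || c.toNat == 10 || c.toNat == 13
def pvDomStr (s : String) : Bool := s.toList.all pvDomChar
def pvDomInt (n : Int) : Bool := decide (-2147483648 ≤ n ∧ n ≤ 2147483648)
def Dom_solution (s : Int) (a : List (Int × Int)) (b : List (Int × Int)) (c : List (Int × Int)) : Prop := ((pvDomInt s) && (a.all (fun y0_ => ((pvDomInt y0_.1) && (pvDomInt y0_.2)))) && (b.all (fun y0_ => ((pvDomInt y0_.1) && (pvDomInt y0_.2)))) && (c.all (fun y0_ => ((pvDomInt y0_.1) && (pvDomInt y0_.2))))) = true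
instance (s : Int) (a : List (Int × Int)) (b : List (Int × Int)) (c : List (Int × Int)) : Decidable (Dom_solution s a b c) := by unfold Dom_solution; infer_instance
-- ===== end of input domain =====

-- B replaces A's monotone two-pointer scan of c with a value→minimal-index dict built once
-- (objective: simpler); equivalence is about the RETURN value — both Pythons perform the
-- same three in-place sorts of a, b, c, so the observable mutation is identical.

-- ===== PORT A =====
-- Python tuple '<' on triples is lexicographic (Lean's '<' on products is pointwise)
def pvLex3Lt (x y : Int × Int × Int) : Bool :=
  decide (x.1 < y.1) ||
    (decide (x.1 = y.1) && (decide (x.2.1 < y.2.1) ||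
      (decide (x.2.1 = y.2.1) && decide (x.2.2 < y.2.2))))

-- Python min(x, y) on triples (returns x on ties)
def pvMin3 (x y : Int × Int × Int) : Int × Int × Int := if pvLex3Lt y x then y else x

-- the 'while pos >= 0 and c[pos][0] > t: pos -= 1' loop of A (pos stays < len c throughout)
def pvWhileA (c : List (Int × Int)) (t : Int) (pos : Int) : Int :=
  if h : 0 ≤ pos ∧ t < (PySem.List.pyGetD c pos (0, 0)).1 then pvWhileA c t (pos - 1) else pos
termination_by (pos + 1).toNat
decreasing_by omega

-- A's inner 'for num2, j in b' loop; state = (pos, ans)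
def pvInnerA (s : Int) (c : List (Int × Int)) (num1 i : Int)
    (b : List (Int × Int)) (st : Int × (Int × Int × Int)) : Int × (Int × Int × Int) :=
  b.foldl (fun st p =>
    let pos := pvWhileA c (s - (num1 + p.1)) st.1
    let ans := if 0 ≤ pos ∧ (PySem.List.pyGetD c pos (0, 0)).1 = s - (num1 + p.1)
               then pvMin3 st.2 (i, p.2, (PySem.List.pyGetD c pos (0, 0)).2)
               else st.2
    (pos, ans)) st

def solution (s : Int) (a : List (Int × Int)) (b : List (Int × Int)) (c : List (Int × Int)) : Int × Int × Int :=
  let a' := PySem.List.sorted2 a Prod.fst Prod.snd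
  let b' := PySem.List.sorted2 b Prod.fst Prod.snd
  let c' := PySem.List.sorted2 c Prod.fst (fun p => -p.2)
  a'.foldl (fun ans p => (pvInnerA s c' p.1 p.2 b' (((c'.length : Int)) - 1, ans)).2)
    (15000, 15000, 15000)

-- ===== PORT B =====
def solution_alt (s : Int) (a : List (Int × Int)) (b : List (Int × Int)) (c : List (Int × Int)) : Int × Int × Int :=
  let a' := PySem.List.sorted2 a Prod.fst Prod.snd
  let b' := PySem.List.sorted2 b Prod.fst Prod.snd
  let c' := PySem.List.sorted2 c Prod.fst (fun p => -p.2)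
  let d := c'.foldl (fun d p => d.insert p.1 p.2) (PySem.Dict.empty (κ := Int) (ν := Int))
  a'.foldl (fun ans p =>
    b'.foldl (fun ans q =>
      match d.get? (s - (p.1 + q.1)) with
      | some k => pvMin3 ans (p.2, q.2, k)
      | none => ans) ans) (15000, 15000, 15000)

-- ===== PRECONDITION & SPEC =====
def Spec_solution (s : Int) (a : List (Int × Int)) (b : List (Int × Int)) (c : List (Int × Int)) (out : Int × Int × Int) : Prop := out = solution_alt s a b c
instance (s : Int) (a : List (Int × Int)) (b : List (Int × Int)) (c : List (Int × Int)) (out : Int × Int × Int) : Decidable (Spec_solution s a b c out) := by unfold Spec_solution; infer_instance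

-- ===== CLAIM (what is proved, stated in full; the proofs are below) =====
def Claim_equal_solution : Prop := ∀ (s : Int) (a : List (Int × Int)) (b : List (Int × Int)) (c : List (Int × Int)), Dom_solution s a b c → Spec_solution s a b c (solution s a b c)

-- ===== LEMMAS AND PROOFS =====

-- sorted2's comparator, named
def pvBf {α : Type} (k1 k2 : α → Int) (a b : α) : Bool :=
  decide (k1 a < k1 b) || (!decide (k1 b < k1 a) && decide (k2 a < k2 b))

lemma pvBf_iff {α : Type} (k1 k2 : α → Int) (a b : α) :
    pvBf k1 k2 a b = true ↔ (k1 a < k1 b ∨ (¬ k1 b < k1 a ∧ k2 a < k2 b)) := by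
  simp [pvBf]

lemma pvBf_asym {α : Type} (k1 k2 : α → Int) (a b : α) (h : pvBf k1 k2 a b = true) :
    pvBf k1 k2 b a = false := by
  rw [Bool.eq_false_iff]
  intro h'
  rw [pvBf_iff] at h h'
  omega

lemma pvBf_trans {α : Type} (k1 k2 : α → Int) (a b c : α) (hab : pvBf k1 k2 a b = true)
    (hbc : pvBf k1 k2 b c = true) : pvBf k1 k2 a c = true := by
  rw [pvBf_iff] at *
  omega

lemma pvInsertBy_pairwise {α : Type} (k1 k2 : α → Int) (x : α) (ys : List α)
    (h : ys.Pairwise (fun a b => pvBf k1 k2 b a = false)) :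
    (PySem.List.insertBy (pvBf k1 k2) x ys).Pairwise (fun a b => pvBf k1 k2 b a = false) := by
  induction ys with
  | nil => simp [PySem.List.insertBy]
  | cons y ys ih =>
    rw [List.pairwise_cons] at h
    obtain ⟨hy, hys⟩ := h
    rw [PySem.List.insertBy]
    by_cases hxy : pvBf k1 k2 x y = true
    · rw [if_pos hxy]
      refine List.Pairwise.cons ?_ (List.Pairwise.cons hy hys)
      intro z hz
      rcases List.mem_cons.mp hz with rfl | hz
      · exact pvBf_asym _ _ _ _ hxy
      · by_contra hcon
        have hzx : pvBf k1 k2 z x = true := by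
          cases hzx : pvBf k1 k2 z x with
          | true => rfl
          | false => exact absurd hzx hcon
        exact absurd (hy z hz) (by simp [pvBf_trans k1 k2 z x y hzx hxy])
    · rw [if_neg hxy]
      refine List.Pairwise.cons ?_ (ih hys)
      intro z hz
      rcases (PySem.List.mem_insertBy _ _ _ _).mp hz with rfl | hz
      · simpa using hxy
      · exact hy z hz

lemma pvFoldl_insertBy_pairwise {α : Type} (k1 k2 : α → Int) :
    ∀ (xs acc : List α), acc.Pairwise (fun a b => pvBf k1 k2 b a = false) →
    (xs.foldl (fun acc x => PySem.List.insertBy (pvBf k1 k2) x acc) acc).Pairwise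
      (fun a b => pvBf k1 k2 b a = false) := by
  intro xs
  induction xs with
  | nil => intro acc h; simpa using h
  | cons x xs ih =>
    intro acc h
    simpa using ih _ (pvInsertBy_pairwise k1 k2 x acc h)

lemma pv_sorted2_pairwise {α : Type} (k1 k2 : α → Int) (xs : List α) :
    (PySem.List.sorted2 xs k1 k2).Pairwise (fun a b => pvBf k1 k2 b a = false) := by
  have : PySem.List.sorted2 xs k1 k2 =
      xs.foldl (fun acc x => PySem.List.insertBy (pvBf k1 k2) x acc) [] := rfl
  rw [this]
  exact pvFoldl_insertBy_pairwise k1 k2 xs [] (by simp)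

-- last value stored for key v when folding inserts over a pair list
def pvLastVal (c : List (Int × Int)) (v : Int) : Option Int :=
  c.foldl (fun acc p => if p.1 = v then some p.2 else acc) none

lemma pv_dict_get? (l : List (Int × Int)) : ∀ (d : PySem.Dict Int Int) (v : Int),
    (l.foldl (fun d p => d.insert p.1 p.2) d).get? v =
      l.foldl (fun acc p => if p.1 = v then some p.2 else acc) (d.get? v) := by
  induction l with
  | nil => intro d v; simp
  | cons p l ih =>
    intro d v
    simp only [List.foldl_cons]
    rw [ih]
    congr 1
    rw [PySem.Dict.get?_insert]
    by_cases h : v = p.1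
    · simp [h]
    · simp [h, Ne.symm h]

lemma pvLastVal_append (l : List (Int × Int)) (p : Int × Int) (v : Int) :
    pvLastVal (l ++ [p]) v = if p.1 = v then some p.2 else pvLastVal l v := by
  simp [pvLastVal, List.foldl_append]

lemma pvLastVal_none (v : Int) :
    ∀ (c : List (Int × Int)), (∀ q : ℕ, q < c.length → (c.getD q (0, 0)).1 ≠ v) →
    pvLastVal c v = none := by
  intro c
  induction c using List.reverseRecOn with
  | nil => intro _; rfl
  | append_singleton l p ih =>
    intro h
    rw [pvLastVal_append]
    have hp : p.1 ≠ v := by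
      have := h l.length (by simp)
      simpa using this
    rw [if_neg hp]
    apply ih
    intro q hq
    have := h q (by simp; omega)
    rwa [List.getD_append l [p] (0,0) q hq] at this

lemma pvLastVal_last (v : Int) :
    ∀ (c : List (Int × Int)) (k : ℕ), k < c.length → (c.getD k (0, 0)).1 = v →
    (∀ q : ℕ, k < q → q < c.length → (c.getD q (0, 0)).1 ≠ v) →
    pvLastVal c v = some (c.getD k (0, 0)).2 := by
  intro c
  induction c using List.reverseRecOn with
  | nil => intro k hk; simp at hk
  | append_singleton l p ih =>
    intro k hk hkv habove
    rw [pvLastVal_append]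
    by_cases hke : k = l.length
    · subst hke
      have hpget : (l ++ [p]).getD l.length (0, 0) = p := by simp
      rw [hpget] at hkv ⊢
      rw [if_pos hkv]
    · have hk' : k < l.length := by simp at hk; omega
      have hp : p.1 ≠ v := by
        have := habove l.length (by omega) (by simp)
        simpa using this
      rw [if_neg hp]
      rw [List.getD_append l [p] (0,0) k hk'] at hkv ⊢
      apply ih k hk' hkv
      intro q hq hql
      have := habove q hq (by simp; omega)
      rwa [List.getD_append l [p] (0,0) q hql] at this

-- the while loop: stops in range, everything strictly above the stop is > t,
-- and the stop itself (if any) is ≤ t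
lemma pvWhileA_spec (c : List (Int × Int)) (t : Int) :
    ∀ (n : ℕ) (pos : Int), (pos + 1).toNat ≤ n → -1 ≤ pos → pos < (c.length : Int) →
    (∀ q : ℕ, pos < (q : Int) → q < c.length → t < (c.getD q (0, 0)).1) →
    (-1 ≤ pvWhileA c t pos ∧ pvWhileA c t pos < (c.length : Int) ∧
     (∀ q : ℕ, pvWhileA c t pos < (q : Int) → q < c.length → t < (c.getD q (0, 0)).1) ∧
     (0 ≤ pvWhileA c t pos → (c.getD (pvWhileA c t pos).toNat (0, 0)).1 ≤ t)) := by
  intro n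
  induction n with
  | zero =>
    intro pos hn h1 h2 hinv
    have hpos : pos = -1 := by omega
    subst hpos
    rw [pvWhileA, dif_neg (by omega)]
    exact ⟨by omega, h2, hinv, by omega⟩
  | succ n ih =>
    intro pos hn h1 h2 hinv
    rw [pvWhileA]
    by_cases hc : 0 ≤ pos ∧ t < (PySem.List.pyGetD c pos (0, 0)).1
    · rw [dif_pos hc]
      have hget : PySem.List.pyGetD c pos (0, 0) = c.getD pos.toNat (0, 0) := by
        rw [PySem.List.pyGetD_eq_getElem c (0,0) hc.1 h2,
          List.getD_eq_getElem c (0,0) (by omega)]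
      apply ih
      · omega
      · omega
      · omega
      · intro q hq hlen
        by_cases hq2 : pos < (q : Int)
        · exact hinv q hq2 hlen
        · have hqe : (q : Int) = pos := by omega
          have : q = pos.toNat := by omega
          subst this
          rw [← hget]
          exact hc.2
    · rw [dif_neg hc]
      refine ⟨h1, h2, hinv, ?_⟩
      intro hp
      push Not at hc
      have h3 := hc hp
      rw [PySem.List.pyGetD_eq_getElem c (0,0) hp h2] at h3
      rw [List.getD_eq_getElem c (0,0) (by omega : pos.toNat < c.length)]
      omega

-- the inner loop over b: A's two-pointer state equals B's dict lookups
lemma pvInner_eq (s num1 i : Int) (c : List (Int × Int)) (d : PySem.Dict Int Int)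
    (hd : ∀ v, d.get? v = pvLastVal c v)
    (hmono : ∀ q r : ℕ, q ≤ r → r < c.length → (c.getD q (0, 0)).1 ≤ (c.getD r (0, 0)).1) :
    ∀ (b : List (Int × Int)), b.Pairwise (fun p q => p.1 ≤ q.1) →
    ∀ (pos : Int) (ans : Int × Int × Int), -1 ≤ pos → pos < (c.length : Int) →
    (∀ q : ℕ, pos < (q : Int) → q < c.length →
      ∀ p0 ∈ b.head?, s - (num1 + p0.1) < (c.getD q (0, 0)).1) →
    (pvInnerA s c num1 i b (pos, ans)).2 =
      b.foldl (fun ans q =>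
        match d.get? (s - (num1 + q.1)) with
        | some k => pvMin3 ans (i, q.2, k)
        | none => ans) ans := by
  intro b
  induction b with
  | nil => intro _ pos ans _ _ _; simp [pvInnerA]
  | cons p rest ih =>
    intro hpw pos ans h1 h2 hinv
    rw [List.pairwise_cons] at hpw
    obtain ⟨hp, hrest⟩ := hpw
    simp only [pvInnerA, List.foldl_cons]
    set t := s - (num1 + p.1) with ht
    set p' := pvWhileA c t pos with hp'
    obtain ⟨w1, w2, w3, w4⟩ := pvWhileA_spec c t (pos + 1).toNat pos (le_refl _) h1 h2
      (fun q hq hlen => hinv q hq hlen p rfl)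
    rw [← hp'] at w1 w2 w3 w4
    have hstep : ∀ ans' : Int × Int × Int,
        (pvInnerA s c num1 i rest (p', ans')).2 =
        rest.foldl (fun ans q =>
          match d.get? (s - (num1 + q.1)) with
          | some k => pvMin3 ans (i, q.2, k)
          | none => ans) ans' := by
      intro ans'
      apply ih hrest p' ans' w1 w2
      intro q hq hlen p0 hp0
      have hple : p.1 ≤ p0.1 := hp p0 (List.mem_of_mem_head? hp0)
      have := w3 q hq hlen
      omega
    simp only [pvInnerA] at hstep
    by_cases hm : 0 ≤ p' ∧ (PySem.List.pyGetD c p' (0, 0)).1 = t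
    · -- match found: both sides update ans the same way
      have hget : PySem.List.pyGetD c p' (0, 0) = c.getD p'.toNat (0, 0) := by
        rw [PySem.List.pyGetD_eq_getElem c (0,0) hm.1 w2,
          List.getD_eq_getElem c (0,0) (by omega)]
      have hlv : pvLastVal c t = some (c.getD p'.toNat (0, 0)).2 := by
        apply pvLastVal_last t c p'.toNat (by omega)
        · rw [← hget]; exact hm.2
        · intro q hq hlen
          have := w3 q (by omega) hlen
          omega
      have hdget : d.get? t = some (c.getD p'.toNat (0, 0)).2 := by rw [hd]; exact hlv
      rw [if_pos hm, hget, hstep, hdget]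
    · -- no match: both sides keep ans
      have hlv : pvLastVal c t = none := by
        apply pvLastVal_none
        intro q hq
        by_cases hq2 : p' < (q : Int)
        · have := w3 q hq2 hq; omega
        · push Not at hq2
          have hp0 : 0 ≤ p' := by omega
          have hne : (c.getD p'.toNat (0, 0)).1 ≠ t := by
            intro he
            apply hm
            refine ⟨hp0, ?_⟩
            rw [PySem.List.pyGetD_eq_getElem c (0,0) hp0 w2,
              ← List.getD_eq_getElem c (0,0) (by omega)]
            exact he
          have hle := w4 hp0
          have := hmono q p'.toNat (by omega) (by omega)
          omega
      have hdget : d.get? t = none := by rw [hd]; exact hlv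
      rw [if_neg hm, hstep, hdget]

lemma pv_main (s : Int) (a b c : List (Int × Int)) : solution s a b c = solution_alt s a b c := by
  simp only [solution, solution_alt]
  set b' := PySem.List.sorted2 b Prod.fst Prod.snd with hb'
  set c' := PySem.List.sorted2 c Prod.fst (fun p => -p.2) with hc'
  set d := c'.foldl (fun d p => d.insert p.1 p.2) (PySem.Dict.empty (κ := Int) (ν := Int)) with hd'
  have hd : ∀ v, d.get? v = pvLastVal c' v := by
    intro v
    rw [hd', pv_dict_get?]
    simp [pvLastVal]
  have hbpw : b'.Pairwise (fun p q => p.1 ≤ q.1) := by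
    apply (pv_sorted2_pairwise Prod.fst Prod.snd b).imp
    intro p q h
    simp only [pvBf, Bool.or_eq_false_iff, Bool.and_eq_false_iff, decide_eq_false_iff_not,
      Bool.not_eq_eq_eq_not] at h
    omega
  have hcpw : c'.Pairwise (fun p q => p.1 ≤ q.1) := by
    apply (pv_sorted2_pairwise Prod.fst (fun p => -p.2) c).imp
    intro p q h
    simp only [pvBf, Bool.or_eq_false_iff, Bool.and_eq_false_iff, decide_eq_false_iff_not,
      Bool.not_eq_eq_eq_not] at h
    omega
  have hmono : ∀ q r : ℕ, q ≤ r → r < c'.length →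
      (c'.getD q (0, 0)).1 ≤ (c'.getD r (0, 0)).1 := by
    intro q r hqr hr
    rcases Nat.lt_or_ge q r with h | h
    · have := (List.pairwise_iff_getElem.mp hcpw) q r (by omega) hr h
      rwa [List.getD_eq_getElem c' (0,0) (by omega), List.getD_eq_getElem c' (0,0) hr]
    · have : q = r := by omega
      subst this
      exact le_refl _
  -- the outer fold over a': pointwise body equality
  have houter : ∀ (l : List (Int × Int)) (ans : Int × Int × Int),
      l.foldl (fun ans p => (pvInnerA s c' p.1 p.2 b' (((c'.length : Int)) - 1, ans)).2) ans =
      l.foldl (fun ans p =>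
        b'.foldl (fun ans q =>
          match d.get? (s - (p.1 + q.1)) with
          | some k => pvMin3 ans (p.2, q.2, k)
          | none => ans) ans) ans := by
    intro l
    induction l with
    | nil => intro ans; rfl
    | cons p l ihl =>
      intro ans
      simp only [List.foldl_cons]
      rw [pvInner_eq s p.1 p.2 c' d hd hmono b' hbpw ((c'.length : Int) - 1) ans
        (by omega) (by omega) (by intro q hq hlen _ _; omega), ihl]
  exact houter _ _

-- ===== VERDICT (by name: the statement is the Claim_ definition above) =====
theorem solution_spec : Claim_equal_solution := by
  intro s a b c _
  unfold Spec_solution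
  exact pv_main s a b c
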